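-- pv_equiv track=rewrite | github.com/MoneyMiyachi/cse180final | snvdeserts.py | snp_desert
-- ===== SOURCE A (Python) =====
-- def snp_desert(pos_list, length):
--     desert_dict = {}
--     f_dict = {}
--     for i in range(1,length+1):
--         if str(i) in pos_list:
--             f_dict[i] = [1,i,i]
--         else:
--             f_dict[i] = [0,i,i]
--     #iters = int(math.log(length,2))
--     #print iters
--     combos = f_dict.values()
--     count = [item[0] for item in combos]
--     for increment in range(50,5050,50):
--         for i in range(increment,length,increment):
--             rating = sum(count[i-increment:i])
--             #print rating
--             desert_dict[i-increment,i] = [rating, i-increment, i]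
--         #print x
--     sorted_desert = sorted(desert_dict.items(), key=lambda k: k[1][0], reverse=True)
--     return sorted_desert
-- ===== SOURCE B (Python) =====
-- def snp_desert(pos_list, length):
--     # Prefix-sum re-implementation: O(1) window sums, set membership.
--     posset = set(pos_list)
--     prefix = [0]
--     acc = 0
--     for j in range(1, length + 1):
--         if str(j) in posset:
--             acc += 1
--         prefix.append(acc)
--     entries = []
--     for increment in range(50, 5050, 50):
--         for i in range(increment, length, increment):
--             rating = prefix[i] - prefix[i - increment]
--             entries.append(((i - increment, i), [rating, i - increment, i]))
--     return sorted(entries, key=lambda e: e[1][0], reverse=True)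
-- ===== Notes on version B (the rewrite author's own statement) =====
-- stated objective: faster
-- what changed: B builds a membership set and a single prefix-sum array so each window count is an O(1) difference instead of A's per-window list slice + sum and O(len(pos_list)) list membership per position, and collects entries in a plain list instead of a dict before the same stable sort.
import Mathlib
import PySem

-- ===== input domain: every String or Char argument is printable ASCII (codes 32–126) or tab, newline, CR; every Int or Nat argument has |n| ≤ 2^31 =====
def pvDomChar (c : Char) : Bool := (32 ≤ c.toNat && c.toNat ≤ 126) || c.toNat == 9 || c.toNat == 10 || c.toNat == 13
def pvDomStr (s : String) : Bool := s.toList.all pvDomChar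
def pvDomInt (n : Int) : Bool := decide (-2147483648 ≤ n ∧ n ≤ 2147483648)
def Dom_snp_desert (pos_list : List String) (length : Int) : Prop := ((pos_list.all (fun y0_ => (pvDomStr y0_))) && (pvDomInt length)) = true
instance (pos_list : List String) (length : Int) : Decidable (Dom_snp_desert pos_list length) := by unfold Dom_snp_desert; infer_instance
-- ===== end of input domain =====

-- B replaces A's per-window slice sums and list membership by one prefix-sum pass and a set,
-- collecting the (window, [count, lo, hi]) entries directly in a list before the same stable sort.

-- ===== PORT A =====
def snp_desert (pos_list : List String) (length : Int) : List ((Int × Int) × List Int) :=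
  let f_dict : PySem.Dict Int (List Int) :=
    (PySem.List.pyRange 1 (length + 1) 1).foldl
      (fun d i =>
        if pos_list.contains (PySem.Int.toStr i) then d.insert i [1, i, i]
        else d.insert i [0, i, i])
      PySem.Dict.empty
  let combos := f_dict.values
  -- item[0]: every stored value is the 3-element list [b, i, i], so headD is exact
  let count := combos.map (fun item => item.headD 0)
  let desert_dict : PySem.Dict (Int × Int) (List Int) :=
    (PySem.List.pyRange 50 5050 50).foldl
      (fun d increment =>
        (PySem.List.pyRange increment length increment).foldl
          (fun d i =>
            let rating := (PySem.List.slice count (some (i - increment)) (some i)).sum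
            d.insert (i - increment, i) [rating, i - increment, i])
          d)
      PySem.Dict.empty
  PySem.List.sorted desert_dict.items (fun k => k.2.headD 0) true

-- ===== PORT B =====
def snp_desert_alt (pos_list : List String) (length : Int) : List ((Int × Int) × List Int) :=
  let posset : PySem.Set String := PySem.Set.ofList pos_list
  let pr :=
    (PySem.List.pyRange 1 (length + 1) 1).foldl
      (fun (st : List Int × Int) j =>
        let acc := if posset.contains (PySem.Int.toStr j) then st.2 + 1 else st.2
        (st.1 ++ [acc], acc))
      ([0], 0)
  let pre := pr.1
  let entries :=
    (PySem.List.pyRange 50 5050 50).foldl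
      (fun es increment =>
        (PySem.List.pyRange increment length increment).foldl
          (fun es i =>
            let rating := PySem.List.pyGetD pre i 0 - PySem.List.pyGetD pre (i - increment) 0
            es ++ [((i - increment, i), [rating, i - increment, i])])
          es)
      []
  PySem.List.sorted entries (fun e => e.2.headD 0) true

-- ===== PRECONDITION & SPEC =====
def Spec_snp_desert (pos_list : List String) (length : Int) (out : List ((Int × Int) × List Int)) : Prop := out = snp_desert_alt pos_list length
instance (pos_list : List String) (length : Int) (out : List ((Int × Int) × List Int)) : Decidable (Spec_snp_desert pos_list length out) := by unfold Spec_snp_desert; infer_instance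

-- ===== CLAIM (what is proved, stated in full; the proofs are below) =====
def Claim_equal_snp_desert : Prop := ∀ (pos_list : List String) (length : Int), Dom_snp_desert pos_list length → Spec_snp_desert pos_list length (snp_desert pos_list length)

-- ===== LEMMAS AND PROOFS =====

-- the 0/1 SNP indicator at position i, and the indicator list for positions 1..length
def pvBit (pos_list : List String) (i : Int) : Int :=
  if pos_list.contains (PySem.Int.toStr i) then 1 else 0

def pvBits (pos_list : List String) (length : Int) : List Int :=
  (PySem.List.pyRange 1 (length + 1) 1).map (pvBit pos_list)

-- all (increment, i) pairs visited by the nested loops, in visit order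
def pvPairs (length : Int) : List (Int × Int) :=
  (PySem.List.pyRange 50 5050 50).flatMap
    (fun inc => (PySem.List.pyRange inc length inc).map (fun i => (inc, i)))

def pvItemA (pos_list : List String) (length : Int) (p : Int × Int) : (Int × Int) × List Int :=
  ((p.2 - p.1, p.2),
   [(PySem.List.slice (pvBits pos_list length) (some (p.2 - p.1)) (some p.2)).sum, p.2 - p.1, p.2])

def pvItemB (pos_list : List String) (length : Int) (p : Int × Int) : (Int × Int) × List Int :=
  ((p.2 - p.1, p.2),
   [((pvBits pos_list length).take p.2.toNat).sum - ((pvBits pos_list length).take (p.2 - p.1).toNat).sum,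
    p.2 - p.1, p.2])

-- nested loop = single loop over the pair list
theorem pv_foldl_nest {α β σ : Type} (outer : List α) (inner : α → List β)
    (g : σ → α → β → σ) (init : σ) :
    outer.foldl (fun s a => (inner a).foldl (fun s b => g s a b) s) init
      = (outer.flatMap (fun a => (inner a).map (fun b => (a, b)))).foldl
          (fun s p => g s p.1 p.2) init := by
  induction outer generalizing init with
  | nil => rfl
  | cons a t ih =>
      simp only [List.foldl_cons, List.flatMap_cons, List.foldl_append, List.foldl_map]
      exact ih _

theorem pv_nodup_pyRange_pos {a b s : Int} (hs : 0 < s) :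
    (PySem.List.pyRange a b s).Nodup := by
  rw [PySem.List.pyRange_of_pos a b hs]
  refine List.Nodup.map ?_ List.nodup_range
  intro x y h
  have hx : (s : Int) * x = s * y := add_left_cancel h
  exact_mod_cast mul_left_cancel₀ (ne_of_gt hs) hx

theorem pv_nodup_flatMap {α β : Type} (l : List α) (f : α → List β)
    (hl : l.Nodup) (h1 : ∀ a ∈ l, (f a).Nodup)
    (h2 : ∀ a ∈ l, ∀ b ∈ l, a ≠ b → ∀ x ∈ f a, x ∉ f b) :
    (l.flatMap f).Nodup := by
  induction l with
  | nil => simp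
  | cons a t ih =>
      simp only [List.flatMap_cons]
      have hat : a ∉ t := (List.nodup_cons.mp hl).1
      refine List.Nodup.append (h1 a (by simp)) ?_ ?_
      · exact ih (List.nodup_cons.mp hl).2
          (fun b hb => h1 b (by simp [hb]))
          (fun b hb c hc hbc => h2 b (by simp [hb]) c (by simp [hc]) hbc)
      · intro x hx hx'
        rcases List.mem_flatMap.mp hx' with ⟨b, hb, hxb⟩
        exact h2 a (by simp) b (by simp [hb]) (fun h => hat (h ▸ hb)) x hx hxb

theorem pv_mem_pvPairs {length : Int} {p : Int × Int} (hp : p ∈ pvPairs length) :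
    50 ≤ p.1 ∧ p.1 ≤ p.2 ∧ p.2 < length := by
  rcases List.mem_flatMap.mp hp with ⟨inc, hinc, hpmem⟩
  rcases List.mem_map.mp hpmem with ⟨i, hi, rfl⟩
  have h1 := (PySem.List.mem_pyRange_iff_of_pos (by norm_num) inc).mp hinc
  have hpos : (0 : Int) < inc := by omega
  have h2 := (PySem.List.mem_pyRange_iff_of_pos hpos i).mp hi
  exact ⟨by omega, by omega, by omega⟩

-- keys (i - inc, i) are fresh throughout the nested loops
theorem pv_keys_nodup (length : Int) :
    ((pvPairs length).map (fun p => (p.2 - p.1, p.2))).Nodup := by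
  refine List.Nodup.map ?_ ?_
  · intro p q h
    have h' : (p.2 - p.1, p.2) = (q.2 - q.1, q.2) := h
    injection h' with h1 h2
    have : p.1 = q.1 := by omega
    exact Prod.ext this h2
  · refine pv_nodup_flatMap _ _ (pv_nodup_pyRange_pos (by norm_num)) ?_ ?_
    · intro inc hinc
      have h1 := (PySem.List.mem_pyRange_iff_of_pos (by norm_num) inc).mp hinc
      refine List.Nodup.map ?_ (pv_nodup_pyRange_pos (by omega))
      intro x y h
      exact congrArg Prod.snd h
    · intro a _ b _ hab x hxa hxb
      rcases List.mem_map.mp hxa with ⟨i, _, rfl⟩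
      rcases List.mem_map.mp hxb with ⟨j, _, hj⟩
      exact hab (by injection hj with h1 h2; exact h1.symm)

-- a window sum is a difference of prefix sums
theorem pv_sum_take_sub (l : List Int) (a b : Nat) (hab : a ≤ b) :
    ((l.drop a).take (b - a)).sum = (l.take b).sum - (l.take a).sum := by
  have h : l.take b = l.take a ++ (l.drop a).take (b - a) := by
    conv_lhs => rw [show b = a + (b - a) by omega]
    rw [List.take_add]
  rw [h, List.sum_append]
  ring

-- B's prefix loop computes all prefix sums
theorem pv_prefix_fold (bits : List Int) : ∀ (p : List Int) (s : Int),
    bits.foldl (fun st b => (st.1 ++ [st.2 + b], st.2 + b)) (p, s)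
      = (p ++ (List.range bits.length).map (fun k => s + (bits.take (k + 1)).sum),
         s + bits.sum) := by
  induction bits with
  | nil => intro p s; simp
  | cons b bs ih =>
      intro p s
      simp only [List.foldl_cons]
      rw [ih (p ++ [s + b]) (s + b)]
      simp only [Prod.mk.injEq]
      refine ⟨?_, by rw [List.sum_cons]; ring⟩
      rw [List.append_assoc]
      congr 1
      rw [List.length_cons, List.range_succ_eq_map, List.map_cons, List.map_map,
        List.singleton_append]
      congr 1
      · simp
      · apply List.map_congr_left
        intro k _
        simp only [Function.comp_apply, Nat.succ_eq_add_one, List.take_succ_cons,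
          List.sum_cons]
        ring

-- count (A's indicator list) is pvBits
theorem pv_count_eq (pos_list : List String) (length : Int) :
    (((PySem.List.pyRange 1 (length + 1) 1).foldl
        (fun (d : PySem.Dict Int (List Int)) i =>
          if pos_list.contains (PySem.Int.toStr i) then d.insert i [1, i, i]
          else d.insert i [0, i, i])
        PySem.Dict.empty).values.map (fun item => item.headD 0))
      = pvBits pos_list length := by
  have hfun : (fun (d : PySem.Dict Int (List Int)) (i : Int) =>
      if pos_list.contains (PySem.Int.toStr i) then d.insert i [1, i, i]
      else d.insert i [0, i, i])
      = fun d i => d.insert i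
          (if pos_list.contains (PySem.Int.toStr i) then [1, i, i] else [0, i, i]) := by
    funext d i; split <;> rfl
  rw [hfun]
  have hitems := PySem.Dict.items_foldl_insert_fresh
    (PySem.List.pyRange 1 (length + 1) 1) (fun i => i)
    (fun i => if pos_list.contains (PySem.Int.toStr i) then [1, i, i] else [0, i, i])
    PySem.Dict.empty
    (fun a _ => PySem.Dict.contains_empty a)
    (by simpa using PySem.List.nodup_pyRange_one 1 (length + 1))
  show ((_ : PySem.Dict Int (List Int)).items.map (·.2)).map (fun item => item.headD 0) = _
  rw [hitems]
  have hemp : (PySem.Dict.empty : PySem.Dict Int (List Int)).items = [] := rfl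
  rw [hemp, List.nil_append, List.map_map, List.map_map]
  unfold pvBits
  apply List.map_congr_left
  intro i _
  simp only [Function.comp_apply]
  unfold pvBit
  split <;> rfl

theorem pv_contains_ofList (xs : List String) (x : String) :
    (PySem.Set.ofList xs).contains x = xs.contains x := by
  simp [PySem.Set.contains_eq_listContains]

-- value of B's prefix list at index k
theorem pv_pre_getD (bits : List Int) (k : Nat) (hk : k ≤ bits.length) :
    PySem.List.pyGetD
      ((bits.foldl (fun st b => (st.1 ++ [st.2 + b], st.2 + b)) ([0], 0)).1) (k : Int) 0
      = (bits.take k).sum := by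
  rw [pv_prefix_fold]
  rw [PySem.List.pyGetD_of_nonneg _ _ (by positivity)]
  simp only [Int.toNat_natCast]
  cases k with
  | zero => simp
  | succ j =>
      have hj : j < bits.length := by omega
      rw [List.singleton_append, List.getD_cons_succ,
        PySem.List.getD_map_range _ _ _ _ hj]
      simp

-- nested dict-building loop: items in visit order
theorem pv_dict_nest_items {κ ν : Type} [BEq κ] [LawfulBEq κ] {α β : Type}
    (outer : List α) (inner : α → List β) (k : α → β → κ) (v : α → β → ν)
    (hnd : ((outer.flatMap fun a => (inner a).map fun b => (a, b)).map
              (fun p => k p.1 p.2)).Nodup) :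
    (outer.foldl
        (fun d a => (inner a).foldl (fun d b => d.insert (k a b) (v a b)) d)
        PySem.Dict.empty).items
      = (outer.flatMap fun a => (inner a).map fun b => (a, b)).map
          (fun p => (k p.1 p.2, v p.1 p.2)) := by
  rw [pv_foldl_nest outer inner (fun d a b => d.insert (k a b) (v a b)) PySem.Dict.empty]
  have h := PySem.Dict.items_foldl_insert_fresh
    (outer.flatMap fun a => (inner a).map fun b => (a, b))
    (fun p => k p.1 p.2) (fun p => v p.1 p.2) PySem.Dict.empty
    (fun a _ => PySem.Dict.contains_empty _) hnd
  simpa using h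

theorem pv_foldl_append_map {α γ : Type} (l : List α) (f : α → γ) :
    ∀ acc : List γ, l.foldl (fun es x => es ++ [f x]) acc = acc ++ l.map f := by
  induction l with
  | nil => intro acc; simp
  | cons x t ih => intro acc; simp only [List.foldl_cons, List.map_cons, ih]; simp

-- nested list-building loop: entries in visit order
theorem pv_list_nest {α β γ : Type} (outer : List α) (inner : α → List β)
    (f : α → β → γ) :
    outer.foldl (fun es a => (inner a).foldl (fun es b => es ++ [f a b]) es) []
      = (outer.flatMap fun a => (inner a).map fun b => (a, b)).map
          (fun p => f p.1 p.2) := by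
  rw [pv_foldl_nest outer inner (fun es a b => es ++ [f a b]) ([] : List γ)]
  rw [pv_foldl_append_map]
  rw [List.nil_append]

theorem pv_bits_length (pos_list : List String) (length : Int) :
    (pvBits pos_list length).length = length.toNat := by
  unfold pvBits
  rw [List.length_map, PySem.List.length_pyRange_one]
  omega

theorem pv_A_eq (pos_list : List String) (length : Int) :
    snp_desert pos_list length
      = PySem.List.sorted ((pvPairs length).map (pvItemA pos_list length))
          (fun e => e.2.headD 0) true := by
  unfold snp_desert
  simp only []
  rw [pv_count_eq]
  rw [pv_dict_nest_items (PySem.List.pyRange 50 5050 50)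
        (fun inc => PySem.List.pyRange inc length inc)
        (fun inc i => (i - inc, i))
        (fun inc i =>
          [(PySem.List.slice (pvBits pos_list length) (some (i - inc)) (some i)).sum,
           i - inc, i])
        (pv_keys_nodup length)]
  rfl

theorem pv_B_eq (pos_list : List String) (length : Int) :
    snp_desert_alt pos_list length
      = PySem.List.sorted ((pvPairs length).map (pvItemB pos_list length))
          (fun e => e.2.headD 0) true := by
  unfold snp_desert_alt
  simp only []
  have hstep : (fun (st : List Int × Int) (j : Int) =>
      (st.1 ++ [if (PySem.Set.ofList pos_list).contains (PySem.Int.toStr j)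
                then st.2 + 1 else st.2],
       if (PySem.Set.ofList pos_list).contains (PySem.Int.toStr j)
       then st.2 + 1 else st.2))
      = fun st j => (st.1 ++ [st.2 + pvBit pos_list j], st.2 + pvBit pos_list j) := by
    funext st j
    unfold pvBit
    rw [pv_contains_ofList]
    split <;> simp
  rw [hstep, ← List.foldl_map (f := pvBit pos_list)
      (g := fun (st : List Int × Int) b => (st.1 ++ [st.2 + b], st.2 + b))]
  have hbits : (PySem.List.pyRange 1 (length + 1) 1).map (pvBit pos_list)
      = pvBits pos_list length := rfl
  rw [hbits]
  rw [pv_list_nest (PySem.List.pyRange 50 5050 50)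
        (fun inc => PySem.List.pyRange inc length inc)
        (fun inc i =>
          ((i - inc, i),
           [PySem.List.pyGetD
              (((pvBits pos_list length).foldl
                  (fun (st : List Int × Int) b => (st.1 ++ [st.2 + b], st.2 + b))
                  ([0], 0)).1) i 0
            - PySem.List.pyGetD
                (((pvBits pos_list length).foldl
                    (fun (st : List Int × Int) b => (st.1 ++ [st.2 + b], st.2 + b))
                    ([0], 0)).1) (i - inc) 0,
            i - inc, i]))]
  apply congrArg (fun l => PySem.List.sorted l (fun e : (Int × Int) × List Int => e.2.headD 0) true)
  apply List.map_congr_left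
  intro p hp
  obtain ⟨h50, hle, hlt⟩ := pv_mem_pvPairs hp
  have h2 : (0 : Int) ≤ p.2 := by omega
  have h1 : (0 : Int) ≤ p.2 - p.1 := by omega
  have hb2 : p.2.toNat ≤ (pvBits pos_list length).length := by
    rw [pv_bits_length]; omega
  have hb1 : (p.2 - p.1).toNat ≤ (pvBits pos_list length).length := by
    rw [pv_bits_length]; omega
  unfold pvItemB
  have e2 : PySem.List.pyGetD
      (((pvBits pos_list length).foldl
          (fun (st : List Int × Int) b => (st.1 ++ [st.2 + b], st.2 + b)) ([0], 0)).1)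
      p.2 0 = ((pvBits pos_list length).take p.2.toNat).sum := by
    rw [← Int.toNat_of_nonneg h2]
    exact pv_pre_getD _ _ (by simpa using hb2)
  have e1 : PySem.List.pyGetD
      (((pvBits pos_list length).foldl
          (fun (st : List Int × Int) b => (st.1 ++ [st.2 + b], st.2 + b)) ([0], 0)).1)
      (p.2 - p.1) 0 = ((pvBits pos_list length).take (p.2 - p.1).toNat).sum := by
    rw [← Int.toNat_of_nonneg h1]
    exact pv_pre_getD _ _ (by simpa using hb1)
  rw [e2, e1]

theorem pv_main (pos_list : List String) (length : Int) :
    snp_desert pos_list length = snp_desert_alt pos_list length := by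
  rw [pv_A_eq, pv_B_eq]
  apply congrArg (fun l => PySem.List.sorted l (fun e : (Int × Int) × List Int => e.2.headD 0) true)
  apply List.map_congr_left
  intro p hp
  obtain ⟨h50, hle, hlt⟩ := pv_mem_pvPairs hp
  unfold pvItemA pvItemB
  have h2 : (0 : Int) ≤ p.2 := by omega
  have h1 : (0 : Int) ≤ p.2 - p.1 := by omega
  have hab : (p.2 - p.1).toNat ≤ p.2.toNat := Int.toNat_le_toNat (by omega)
  rw [PySem.List.slice_toNat _ h1 h2, pv_sum_take_sub _ _ _ hab]

-- ===== VERDICT (by name: the statement is the Claim_ definition above) =====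
theorem snp_desert_spec : Claim_equal_snp_desert := by
  intro pos_list length _
  unfold Spec_snp_desert
  exact pv_main pos_list length
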